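-- pv_equiv track=rewrite | github.com/ulfili/python | EXAM/exam5/exam.py | prettify_string
-- ===== SOURCE A (Python) =====
-- def prettify_string(input_string: str) -> str:
--     """
--     Prettify string.
--
--     - After every punctuation (,.!?:;-) there should be at least one space.
--     - Every sentence should start with an uppercase letter.
--     - Sentence starts after .!?
--     - Also in the beginning of the string a new sentence starts
--
--     There are no consecutive punctuation in the input string.
--
--     Examples:
--     "Hello,I am the input of this function.please make me pretty!" => "Hello, I am the input of this function. Please
--     make me pretty!"
--     "there should be space after me-and also space after me;next sentence should be capitalized! i need to be capitalized but
--     no new space should be added." => "There should be space after me- and also space after me; next sentence should be capitalized! I need to be capitalized but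
--     no new space should be added."
--     """
--     space = False
--     result = ""
--     for c in input_string:
--         if space:
--             if c != " ":
--                 result += " "
--             space = False
--         if c in ",.!?:;-":
--             space = True
--         result += c
--     cap = True
--     input_string = result
--     result = ""
--     for c in input_string:
--         if cap:
--             if c != " ":
--                 c = c.upper()
--                 cap = False
--         if c in ".!?-":
--             cap = True
--         result += c
--     return result
-- ===== SOURCE B (Python) =====
-- def _cap_first(t: str) -> str:
--     i = 0
--     while i < len(t) and t[i] == ' ':
--         i += 1
--     return t if i == len(t) else t[:i] + t[i].upper() + t[i + 1:]
--
--
-- def prettify_string(input_string: str) -> str: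
--     s = input_string
--     # pass 1, flag-free: look at each adjacent pair; a space goes between a
--     # punctuation mark and a following non-space character
--     spaced = s[:1] + ''.join(
--         (' ' + c) if (p in ',.!?:;-' and c != ' ') else c
--         for p, c in zip(s, s[1:])
--     )
--     # pass 2, flag-free: split into sentence chunks (each chunk ends right
--     # after .!?-), then uppercase the first non-space character of each chunk
--     chunks = []
--     cur = []
--     for c in spaced:
--         cur.append(c)
--         if c in '.!?-':
--             chunks.append(''.join(cur))
--             cur = []
--     chunks.append(''.join(cur))
--     return ''.join(_cap_first(ch) for ch in chunks)
-- ===== Notes on version B (the rewrite author's own statement) =====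
-- stated objective: alternative
-- what changed: Replaces A's two flag-carrying state-machine passes by flag-free ones: a pairwise look-behind pass over zip(s, s[1:]) inserts the spaces, then the string is split into sentence chunks ending after .!?- and the first non-space character of each chunk is uppercased.
import Mathlib
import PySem

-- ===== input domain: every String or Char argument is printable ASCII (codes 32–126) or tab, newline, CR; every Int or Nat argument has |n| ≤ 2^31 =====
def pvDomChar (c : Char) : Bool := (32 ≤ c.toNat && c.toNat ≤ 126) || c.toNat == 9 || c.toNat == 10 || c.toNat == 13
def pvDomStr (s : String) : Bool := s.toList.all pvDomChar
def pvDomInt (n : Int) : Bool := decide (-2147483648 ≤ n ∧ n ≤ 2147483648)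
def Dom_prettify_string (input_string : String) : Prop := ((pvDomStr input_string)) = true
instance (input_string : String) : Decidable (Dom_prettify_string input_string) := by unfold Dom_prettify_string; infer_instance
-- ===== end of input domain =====

-- B replaces A's two flag-driven passes by flag-free ones: a pairwise look-behind pass for the
-- spaces, then a split-into-sentence-chunks pass with the first non-space char of each chunk
-- uppercased (objective: alternative decomposition, same O(n) cost).

-- punctuation sets (the Python literals ",.!?:;-" and ".!?-")
def pvP1 : List Char := [',', '.', '!', '?', ':', ';', '-']
def pvP2 : List Char := ['.', '!', '?', '-']

-- ===== PORT A =====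
-- pass 1: 'space' flag, insert " " after punctuation; state = (space, result)
def pvStep1 (st : Bool × List Char) (c : Char) : Bool × List Char :=
  let r := if st.1 = true ∧ c ≠ ' ' then st.2 ++ [' '] else st.2
  (decide (c ∈ pvP1), r ++ [c])

-- pass 2: 'cap' flag, uppercase sentence starts; state = (cap, result)
def pvStep2 (st : Bool × List Char) (c : Char) : Bool × List Char :=
  let ch := if st.1 = true ∧ c ≠ ' ' then c.toUpper else c
  let cap := if st.1 = true ∧ c ≠ ' ' then false else st.1
  let cap := if ch ∈ pvP2 then true else cap
  (cap, st.2 ++ [ch])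

def prettify_string (input_string : String) : String :=
  let p1 := input_string.toList.foldl pvStep1 (false, [])
  let p2 := p1.2.foldl pvStep2 (true, [])
  String.mk p2.2

-- ===== PORT B =====
-- the zip(s, s[1:]) generator: previous char p, emit ' '+c or c for each current char c
def pvPairs : Char → List Char → List Char
  | _, [] => []
  | p, c :: t => (if p ∈ pvP1 ∧ c ≠ ' ' then [' ', c] else [c]) ++ pvPairs c t

-- the chunking loop: cut the list right after every sentence-ending mark
def pvSplitAfter : List Char → List (List Char)
  | [] => [[]]
  | c :: t =>
    if c ∈ pvP2 then [c] :: pvSplitAfter t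
    else match pvSplitAfter t with
      | [] => [[c]]
      | h :: r => (c :: h) :: r

-- _cap_first: skip leading spaces, uppercase the first other char, keep the rest
def pvCapFirst : List Char → List Char
  | [] => []
  | c :: t => if c = ' ' then c :: pvCapFirst t else c.toUpper :: t

def prettify_string_alt (input_string : String) : String :=
  let spaced :=
    match input_string.toList with
    | [] => []
    | c :: t => c :: pvPairs c t
  String.mk (((pvSplitAfter spaced).map pvCapFirst).flatten)

-- ===== PRECONDITION & SPEC =====
def Spec_prettify_string (input_string : String) (out : String) : Prop := out = prettify_string_alt input_string
instance (input_string : String) (out : String) : Decidable (Spec_prettify_string input_string out) := by unfold Spec_prettify_string; infer_instance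

-- ===== CLAIM (what is proved, stated in full; the proofs are below) =====
def Claim_equal_prettify_string : Prop := ∀ (input_string : String), Dom_prettify_string input_string → Spec_prettify_string input_string (prettify_string input_string)

-- ===== LEMMAS AND PROOFS =====

-- accumulator-free versions of A's two loops, used only by the proof
def pvF1 : Bool → List Char → List Char
  | _, [] => []
  | sp, c :: t => (if sp = true ∧ c ≠ ' ' then [' '] else []) ++ c :: pvF1 (decide (c ∈ pvP1)) t

def pvF2 : Bool → List Char → List Char
  | _, [] => []
  | cap, c :: t =>
    let ch := if cap = true ∧ c ≠ ' ' then c.toUpper else c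
    let cap' := if ch ∈ pvP2 then true else (if cap = true ∧ c ≠ ' ' then false else cap)
    ch :: pvF2 cap' t

theorem pvFold1 (l : List Char) : ∀ (sp : Bool) (acc : List Char),
    (l.foldl pvStep1 (sp, acc)).2 = acc ++ pvF1 sp l := by
  induction l with
  | nil => intro sp acc; simp [pvF1]
  | cons c t ih =>
    intro sp acc
    simp only [List.foldl, pvStep1, pvF1, ih]
    by_cases h : sp = true ∧ c ≠ ' ' <;> simp [h]

theorem pvFold2 (l : List Char) : ∀ (cap : Bool) (acc : List Char),
    (l.foldl pvStep2 (cap, acc)).2 = acc ++ pvF2 cap l := by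
  induction l with
  | nil => intro cap acc; simp [pvF2]
  | cons c t ih =>
    intro cap acc
    simp only [List.foldl, pvStep2, pvF2, ih]
    simp

-- characters and their membership in pvP2 as codes
theorem pv_mem_pvP2_toNat (d : Char) :
    d ∈ pvP2 ↔ (d.toNat = 46 ∨ d.toNat = 33 ∨ d.toNat = 63 ∨ d.toNat = 45) := by
  constructor
  · intro h
    rcases (by simpa [pvP2] using h : d = '.' ∨ d = '!' ∨ d = '?' ∨ d = '-') with h|h|h|h <;>
      subst h <;> decide
  · intro h
    have : d = '.' ∨ d = '!' ∨ d = '?' ∨ d = '-' := by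
      rcases h with h|h|h|h
      · exact Or.inl (Char.ext (UInt32.toNat_inj.mp h))
      · exact Or.inr (Or.inl (Char.ext (UInt32.toNat_inj.mp h)))
      · exact Or.inr (Or.inr (Or.inl (Char.ext (UInt32.toNat_inj.mp h))))
      · exact Or.inr (Or.inr (Or.inr (Char.ext (UInt32.toNat_inj.mp h))))
    simpa [pvP2] using this

-- uppercasing does not change membership in the sentence-ender set
theorem pv_toUpper_mem (c : Char) : (Char.toUpper c ∈ pvP2) ↔ (c ∈ pvP2) := by
  by_cases h : c.isLower
  · have hb : 97 ≤ c.toNat ∧ c.toNat ≤ 122 := by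
      simpa [Char.isLower, UInt32.le_iff_toNat_le] using h
    have hv : (c.toNat - 32).isValidChar := by
      constructor; omega
    have hup : (Char.toUpper c).toNat = c.toNat - 32 := by
      rw [Char.toUpper_eq_of_isLower h, Char.toNat_ofNat, if_pos hv]
    rw [pv_mem_pvP2_toNat, pv_mem_pvP2_toNat, hup]
    omega
  · rw [Char.toUpper_eq_of_not_isLower h]

-- A's pass 1 is B's pairwise pass
theorem pvF1_pairs (l : List Char) : ∀ (p : Char),
    pvF1 (decide (p ∈ pvP1)) l = pvPairs p l := by
  induction l with
  | nil => intro p; simp [pvF1, pvPairs]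
  | cons c t ih =>
    intro p
    by_cases h : p ∈ pvP1 ∧ c ≠ ' ' <;>
      simp [pvF1, pvPairs, h, ih]

theorem pvSplit_ne (l : List Char) : pvSplitAfter l ≠ [] := by
  induction l with
  | nil => simp [pvSplitAfter]
  | cons c t ih =>
    simp only [pvSplitAfter]
    split
    · simp
    · cases hs : pvSplitAfter t with
      | nil => simp
      | cons h r => simp

-- A's pass 2 is B's chunk-and-capitalize pass
theorem pvF2_split (l : List Char) :
    pvF2 true l = ((pvSplitAfter l).map pvCapFirst).flatten ∧
    pvF2 false l = (match pvSplitAfter l with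
      | [] => []
      | h :: r => h ++ ((r.map pvCapFirst).flatten)) := by
  induction l with
  | nil => simp [pvF2, pvSplitAfter, pvCapFirst]
  | cons c t ih =>
    obtain ⟨h, r, hs⟩ : ∃ h r, pvSplitAfter t = h :: r := by
      cases hs : pvSplitAfter t with
      | nil => exact absurd hs (pvSplit_ne t)
      | cons h r => exact ⟨h, r, rfl⟩
    constructor
    · by_cases hc : c = ' '
      · subst hc
        simp [pvF2, pvSplitAfter, pvCapFirst, hs, pvP2, ih.1]
      · by_cases he : c ∈ pvP2
        · have hu : Char.toUpper c ∈ pvP2 := (pv_toUpper_mem c).mpr he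
          simp [pvF2, pvSplitAfter, pvCapFirst, hc, he, hu, ih.1]
        · have hu : ¬ (Char.toUpper c ∈ pvP2) := fun hh => he ((pv_toUpper_mem c).mp hh)
          simp [pvF2, pvSplitAfter, pvCapFirst, hc, he, hu, hs, ih.2]
    · by_cases he : c ∈ pvP2
      · simp [pvF2, pvSplitAfter, he, ih.1]
      · simp [pvF2, pvSplitAfter, he, hs, ih.2]

-- ===== VERDICT (by name: the statement is the Claim_ definition above) =====
theorem prettify_string_spec : Claim_equal_prettify_string := by
  intro s _
  unfold Spec_prettify_string prettify_string prettify_string_alt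
  simp only [pvFold1, pvFold2, List.nil_append]
  cases hl : s.toList with
  | nil => simp [pvF1, pvF2, pvSplitAfter, pvCapFirst]
  | cons c t =>
    have h1 : pvF1 false (c :: t) = c :: pvPairs c t := by
      simp [pvF1, pvF1_pairs]
    rw [h1, (pvF2_split (c :: pvPairs c t)).1]
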